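-- pv_equiv track=rewrite | github.com/wojnarw/Roguelike-Adventure-Game | engine.py | draw_walls_and_background
-- ===== SOURCE A (Python) =====
-- def draw_walls_and_background(board, WALL, BACKGROUND):
--
--     BOARD_HEIGHT = len(board)
--     BOARD_WIDTH = len(board[0])
--
--     for i in range(BOARD_HEIGHT):
--         for e in range(BOARD_WIDTH):
--             if i == 0 or e == 0 or i == BOARD_HEIGHT-1 or e == BOARD_WIDTH-1:
--                 board[i][e] = WALL
--             else:
--                 board[i][e] = BACKGROUND
--     return board
-- ===== SOURCE B (Python) =====
-- def draw_walls_and_background(board, WALL, BACKGROUND):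
--     W = len(board[0])
--     last = len(board) - 1
--     border = [WALL] * W
--     interior = [WALL] + [BACKGROUND] * (W - 2) + [WALL] if W >= 2 else border
--     for i, row in enumerate(board):
--         row[:W] = border if i == 0 or i == last else interior
--     return board
-- ===== Notes on version B (the rewrite author's own statement) =====
-- stated objective: faster
-- what changed: Replaces A's per-cell nested loop and per-cell conditional with two precomputed row templates (border/interior) stamped whole-row via slice assignment.
import Mathlib
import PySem

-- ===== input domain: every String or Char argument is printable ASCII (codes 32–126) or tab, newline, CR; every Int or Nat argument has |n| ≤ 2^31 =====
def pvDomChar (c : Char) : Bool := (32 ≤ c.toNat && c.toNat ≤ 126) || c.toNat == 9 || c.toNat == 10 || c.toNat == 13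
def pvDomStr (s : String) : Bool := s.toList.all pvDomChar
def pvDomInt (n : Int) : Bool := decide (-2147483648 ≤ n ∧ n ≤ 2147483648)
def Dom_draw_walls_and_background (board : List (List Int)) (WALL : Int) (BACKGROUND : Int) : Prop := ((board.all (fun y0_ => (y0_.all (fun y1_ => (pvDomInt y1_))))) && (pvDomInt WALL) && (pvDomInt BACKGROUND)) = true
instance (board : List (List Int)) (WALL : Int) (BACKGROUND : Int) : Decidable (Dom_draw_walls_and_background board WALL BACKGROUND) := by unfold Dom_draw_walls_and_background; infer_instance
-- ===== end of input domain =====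

-- B replaces A's per-cell nested conditional loop with two precomputed row
-- templates (border / interior) stamped row by row; A mutates `board` in place
-- and B performs the same in-place mutation, the theorems are about the return value.

-- ===== PORT A =====
def draw_walls_and_background (board : List (List Int)) (WALL : Int) (BACKGROUND : Int) : List (List Int) :=
  let H := board.length
  let W := (board.headD []).length
  (List.range H).foldl (fun b i =>
    (List.range W).foldl (fun b e =>
      b.set i ((b.getD i []).set e
        (if i = 0 ∨ e = 0 ∨ i = H - 1 ∨ e = W - 1 then WALL else BACKGROUND))) b) board

-- ===== PORT B =====
def draw_walls_and_background_alt (board : List (List Int)) (WALL : Int) (BACKGROUND : Int) : List (List Int) :=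
  let W := (board.headD []).length
  let last : Int := (board.length : Int) - 1
  let border := List.replicate W WALL
  let interior := if 2 ≤ W then WALL :: (List.replicate (W - 2) BACKGROUND ++ [WALL]) else border
  (PySem.List.enumerate board).map (fun p =>
    (if p.1 = 0 ∨ p.1 = last then border else interior) ++ p.2.drop W)

-- ===== PRECONDITION & SPEC =====
-- Pre_ excludes exactly the inputs where the Python A raises IndexError:
-- the empty board (board[0]) and boards with a row shorter than row 0 (board[i][e]).
def Pre_draw_walls_and_background (board : List (List Int)) (WALL : Int) (BACKGROUND : Int) : Prop :=
  board ≠ [] ∧ ∀ row ∈ board, (board.headD []).length ≤ row.length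
instance (board : List (List Int)) (WALL : Int) (BACKGROUND : Int) : Decidable (Pre_draw_walls_and_background board WALL BACKGROUND) := by unfold Pre_draw_walls_and_background; infer_instance
def pvWitness_draw_walls_and_background : List (List Int) × Int × Int := ([[1,2,3],[4,5,6],[7,8,9]], 9, 7)

def Spec_draw_walls_and_background (board : List (List Int)) (WALL : Int) (BACKGROUND : Int) (out : List (List Int)) : Prop := out = draw_walls_and_background_alt board WALL BACKGROUND
instance (board : List (List Int)) (WALL : Int) (BACKGROUND : Int) (out : List (List Int)) : Decidable (Spec_draw_walls_and_background board WALL BACKGROUND out) := by unfold Spec_draw_walls_and_background; infer_instance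

-- ===== CLAIM (what is proved, stated in full; the proofs are below) =====
def Claim_equal_draw_walls_and_background : Prop := ∀ (board : List (List Int)) (WALL : Int) (BACKGROUND : Int), Dom_draw_walls_and_background board WALL BACKGROUND → Pre_draw_walls_and_background board WALL BACKGROUND → Spec_draw_walls_and_background board WALL BACKGROUND (draw_walls_and_background board WALL BACKGROUND)

-- ===== LEMMAS AND PROOFS =====

-- The inner loop of A writes f e into cell e for e < W: it rewrites the first W cells.
theorem pv_rowFold (f : Nat → Int) : ∀ (W : Nat) (row : List Int), W ≤ row.length →
    (List.range W).foldl (fun r e => r.set e (f e)) row = (List.range W).map f ++ row.drop W := by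
  intro W
  induction W with
  | zero => simp
  | succ W ih =>
    intro row hW
    have hW' : W ≤ row.length := by omega
    have hlt : W < row.length := by omega
    rw [List.range_succ, List.foldl_append, ih row hW']
    simp only [List.foldl_cons, List.foldl_nil]
    rw [List.set_append]
    have hlen : ((List.range W).map f).length = W := by simp
    rw [hlen]
    simp only [lt_irrefl, if_false, Nat.sub_self]
    rw [List.drop_eq_getElem_cons hlt, List.set_cons_zero]
    simp

-- The inner loop only touches row i: it commutes with List.set.
theorem pv_innerComm (W : Nat) (g : Nat → Int) (i : Nat) :
    ∀ (b : List (List Int)), i < b.length →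
    (List.range W).foldl (fun b e => b.set i ((b.getD i []).set e (g e))) b
      = b.set i ((List.range W).foldl (fun r e => r.set e (g e)) (b.getD i [])) := by
  induction W with
  | zero =>
    intro b hi
    simp only [List.range_zero, List.foldl_nil]
    have hbd : b.getD i [] = b[i] := by simp [List.getD, List.getElem?_eq_getElem hi]
    rw [hbd, List.set_getElem_self]
  | succ W ih =>
    intro b hi
    rw [List.range_succ, List.foldl_append, List.foldl_append, ih b hi]
    simp only [List.foldl_cons, List.foldl_nil]
    have hlen : (b.set i ((List.range W).foldl (fun r e => r.set e (g e)) (b.getD i []))).length = b.length := by simp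
    have hget : (b.set i ((List.range W).foldl (fun r e => r.set e (g e)) (b.getD i []))).getD i []
        = (List.range W).foldl (fun r e => r.set e (g e)) (b.getD i []) := by
      rw [List.getD_eq_getElem _ _ (by simpa [hlen] using hi)]
      simp
    rw [hget, List.set_set]

-- The outer loop sets row i to g i (old row i), for i = 0 .. n-1.
theorem pv_outerFold (g : Nat → List Int → List Int) : ∀ (n : Nat) (l : List (List Int)), n ≤ l.length →
    (List.range n).foldl (fun b i => b.set i (g i (b.getD i []))) l
      = (l.take n).mapIdx g ++ l.drop n := by
  intro n
  induction n with
  | zero => simp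
  | succ n ih =>
    intro l hn
    have hn' : n ≤ l.length := by omega
    have hlt : n < l.length := by omega
    rw [List.range_succ, List.foldl_append, ih l hn']
    simp only [List.foldl_cons, List.foldl_nil]
    have hlen : ((l.take n).mapIdx g).length = n := by
      simp [List.length_take, Nat.min_eq_left hn']
    have hget : (((l.take n).mapIdx g) ++ l.drop n).getD n [] = l[n] := by
      unfold List.getD
      rw [List.getElem?_append_right (by omega), hlen, Nat.sub_self, List.getElem?_drop]
      simp [List.getElem?_eq_getElem hlt]
    rw [hget, List.set_append, hlen]
    simp only [lt_irrefl, if_false, Nat.sub_self]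
    rw [List.drop_eq_getElem_cons hlt, List.set_cons_zero]
    have htake : l.take (n + 1) = l.take n ++ [l[n]] := by
      rw [List.take_add_one, List.getElem?_eq_getElem hlt]; rfl
    rw [htake, List.mapIdx_append]
    simp [Nat.min_eq_left hn']

-- enumerate-then-map is mapIdx (with the index cast to Int).
theorem pv_enumMap {β : Type} (F : Int × List Int → β) : ∀ (l : List (List Int)) (s : Int),
    (PySem.List.enumerate l s).map F = l.mapIdx (fun i r => F ((s + (i : Int)), r)) := by
  intro l
  induction l with
  | nil => intro s; simp [PySem.List.enumerate_nil]
  | cons x xs ih =>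
    intro s
    rw [PySem.List.enumerate_cons, List.map_cons, ih (s + 1), List.mapIdx_cons]
    congr 1
    · simp
    · congr 1
      funext i r
      congr 2
      push_cast
      ring

-- A's cell value over one full interior/border row equals the template row.
theorem pv_rowEq (H W : Nat) (WALL BACKGROUND : Int) (i : Nat) :
    (List.range W).map (fun e => if i = 0 ∨ e = 0 ∨ i = H - 1 ∨ e = W - 1 then WALL else BACKGROUND)
      = if i = 0 ∨ i = H - 1 then List.replicate W WALL
        else (if 2 ≤ W then WALL :: (List.replicate (W - 2) BACKGROUND ++ [WALL]) else List.replicate W WALL) := by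
  by_cases hb : i = 0 ∨ i = H - 1
  · rw [if_pos hb]
    rw [List.eq_replicate_iff]
    refine ⟨by simp, ?_⟩
    intro b hbmem
    simp only [List.mem_map, List.mem_range] at hbmem
    obtain ⟨e, _, he⟩ := hbmem
    rw [← he, if_pos (by tauto)]
  · rw [if_neg hb]
    rw [not_or] at hb
    obtain ⟨h0, h1⟩ := hb
    by_cases hW : 2 ≤ W
    · rw [if_pos hW]
      apply List.ext_getElem
      · simp; omega
      · intro e he1 he2
        simp only [List.getElem_map, List.getElem_range]
        rcases e with _ | e'
        · simp [h0, h1]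
        · have he1' : e' + 1 < W := by simpa using he1
          rw [List.getElem_cons_succ]
          by_cases hlast : e' + 1 = W - 1
          · rw [if_pos (by tauto)]
            rw [List.getElem_append_right (by simp; omega)]
            simp
          · rw [if_neg (by omega)]
            rw [List.getElem_append_left (by simp; omega)]
            simp
    · rw [if_neg hW]
      interval_cases W
      · simp
      · simp [h0, h1]

-- A's nested fold, with the inner loop commuted out of each outer step.
theorem pv_nested (f : Nat → Nat → Int) (W : Nat) : ∀ (n : Nat) (l : List (List Int)), n ≤ l.length →
    (List.range n).foldl (fun b i =>
        (List.range W).foldl (fun b e => b.set i ((b.getD i []).set e (f i e))) b) l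
      = (List.range n).foldl (fun b i =>
          b.set i ((List.range W).foldl (fun r e => r.set e (f i e)) (b.getD i []))) l := by
  intro n
  induction n with
  | zero => intro l _; simp
  | succ n ih =>
    intro l hn
    have hn' : n ≤ l.length := by omega
    rw [List.range_succ, List.foldl_append, List.foldl_append, ih l hn']
    simp only [List.foldl_cons, List.foldl_nil]
    have hPlen : ((List.range n).foldl (fun b i =>
        b.set i ((List.range W).foldl (fun r e => r.set e (f i e)) (b.getD i []))) l).length
        = l.length := by
      rw [pv_outerFold (fun i r => List.foldl (fun r e => r.set e (f i e)) r (List.range W)) n l hn']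
      simp [Nat.min_eq_left hn']
      omega
    exact pv_innerComm W (f n) n _ (by omega)

-- ===== VERDICT (by name: the statement is the Claim_ definition above) =====
theorem draw_walls_and_background_spec : Claim_equal_draw_walls_and_background := by
  intro board WALL BACKGROUND _hdom hpre
  obtain ⟨hne, hrows⟩ := hpre
  unfold Spec_draw_walls_and_background draw_walls_and_background draw_walls_and_background_alt
  simp only []
  rw [pv_nested _ _ board.length board (le_refl _),
    pv_outerFold (fun i r => List.foldl (fun r e =>
      r.set e (if i = 0 ∨ e = 0 ∨ i = board.length - 1 ∨ e = (board.headD []).length - 1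
        then WALL else BACKGROUND)) r (List.range (board.headD []).length))
      board.length board (le_refl _), List.take_length, List.drop_length,
    List.append_nil, pv_enumMap]
  apply List.ext_getElem
  · simp
  · intro i h1 h2
    simp only [List.getElem_mapIdx]
    have hi : i < board.length := by simpa using h1
    have hWle : (board.headD []).length ≤ board[i].length := hrows _ (List.getElem_mem hi)
    rw [pv_rowFold _ _ _ hWle, pv_rowEq board.length (board.headD []).length WALL BACKGROUND i]
    have hH : 1 ≤ board.length := by
      cases board with
      | nil => exact absurd rfl hne
      | cons a l => simp
    have hcond : ((0 : Int) + (i : Int) = 0 ∨ (0 : Int) + (i : Int) = (board.length : Int) - 1)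
        ↔ (i = 0 ∨ i = board.length - 1) := by omega
    rw [if_congr hcond rfl rfl]
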